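-- pv_equiv track=rewrite | github.com/felipemoraes/pyNeuIR | pyNeuIR/utils/prepare_ngraph.py | ngraph_counterizer
-- ===== SOURCE A (Python) =====
-- from collections import Counter
--
-- def letter_ngrams(word, n=5):
--     ngrams = []
--     word = "#" + word + "#"
--     for n_ in range(1,n+1):
--         for i in range(0,len(word)-n_+1):
--             ngrams.append(word[i:i+n_])
--     return ngrams
--
-- def ngraph_counterizer(ngraph, terms):
--     counter = []
--     ngram_count = Counter()
--     for i, term in enumerate(terms):
--         ngrams = letter_ngrams(term)
--         for ngram in ngrams:
--             if ngram in ngraph: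
--                 ngram_count[ngraph[ngram]] += 1
--     return ngram_count
-- ===== SOURCE B (Python) =====
-- from collections import Counter
--
-- def letter_ngrams(word, n=5):
--     ngrams = []
--     word = "#" + word + "#"
--     for n_ in range(1,n+1):
--         for i in range(0,len(word)-n_+1):
--             ngrams.append(word[i:i+n_])
--     return ngrams
--
-- def ngraph_counterizer(ngraph, terms):
--     # pass 1: count every letter n-gram across all terms (one Counter)
--     all_counts = Counter()
--     for term in terms:
--         all_counts.update(letter_ngrams(term))
--     # pass 2: translate each DISTINCT n-gram to its id, adding its frequency
--     ngram_count = Counter()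
--     for ngram, freq in all_counts.items():
--         if ngram in ngraph:
--             ngram_count[ngraph[ngram]] += freq
--     return ngram_count
-- ===== Notes on version B (the rewrite author's own statement) =====
-- stated objective: alternative
-- what changed: A increments the id-counter once per n-gram OCCURRENCE inside the term loop; B first builds one Counter of all letter n-grams across every term, then a second pass over its DISTINCT (ngram, freq) items adds freq to ngram_count[ngraph[ngram]] - a two-pass count-then-translate decomposition with one dict lookup per distinct n-gram instead of per occurrence.
import Mathlib
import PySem

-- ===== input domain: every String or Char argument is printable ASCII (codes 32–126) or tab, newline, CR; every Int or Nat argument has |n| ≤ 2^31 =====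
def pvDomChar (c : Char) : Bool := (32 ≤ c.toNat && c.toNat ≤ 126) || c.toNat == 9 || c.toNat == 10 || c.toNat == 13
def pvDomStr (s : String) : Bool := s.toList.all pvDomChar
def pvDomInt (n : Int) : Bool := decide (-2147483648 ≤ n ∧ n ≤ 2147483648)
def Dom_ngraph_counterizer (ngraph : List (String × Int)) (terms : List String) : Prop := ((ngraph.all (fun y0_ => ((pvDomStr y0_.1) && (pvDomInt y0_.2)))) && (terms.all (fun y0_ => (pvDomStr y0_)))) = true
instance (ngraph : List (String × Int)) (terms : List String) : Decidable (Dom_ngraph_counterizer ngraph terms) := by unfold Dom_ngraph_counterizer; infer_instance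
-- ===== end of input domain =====

-- B replaces A's per-occurrence interleaved increment by two passes — one Counter of all
-- letter n-grams, then a translation of each DISTINCT n-gram (with its frequency) to its id —
-- same result, a different decomposition (objective: alternative).

-- ===== PORT A =====
-- letter_ngrams(word, n): shared helper of both Python files (identical code in Source A and Source B)
def letterNgrams (word : String) (n : Int) : List (List Char) :=
  let w : List Char := '#' :: word.toList ++ ['#']
  (PySem.List.pyRange 1 (n + 1) 1).foldl (fun ngrams n_ =>
    (PySem.List.pyRange 0 ((w.length : Int) - n_ + 1) 1).foldl (fun ngrams i =>
      ngrams ++ [PySem.List.slice w (some i) (some (i + n_))]) ngrams) []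

-- dict lookup: 'ngraph[g]' / 'g in ngraph' (first match; a Python dict has unique keys)
def dictGet? (ngraph : List (String × Int)) (g : List Char) : Option Int :=
  match ngraph.find? (fun q => q.1.toList == g) with
  | some q => some q.2
  | none => none

def ngraph_counterizer (ngraph : List (String × Int)) (terms : List String) : List (Int × Int) :=
  let ngram_count : PySem.Dict Int Int :=
    (PySem.List.enumerate terms).foldl (fun d p =>
      (letterNgrams p.2 5).foldl (fun d ngram =>
        match dictGet? ngraph ngram with
        | some v => d.modify v 0 (· + 1)
        | none => d) d) PySem.Dict.empty
  ngram_count.items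

-- ===== PORT B =====
def ngraph_counterizer_alt (ngraph : List (String × Int)) (terms : List String) : List (Int × Int) :=
  -- pass 1: one Counter of every letter n-gram across all terms
  let all_counts : PySem.Dict (List Char) Int :=
    terms.foldl (fun c term =>
      (letterNgrams term 5).foldl (fun c ngram => c.modify ngram 0 (· + 1)) c) PySem.Dict.empty
  -- pass 2: translate each DISTINCT n-gram to its id, adding its frequency
  let ngram_count : PySem.Dict Int Int :=
    all_counts.items.foldl (fun d p =>
      match dictGet? ngraph p.1 with
      | some v => d.modify v 0 (· + p.2)
      | none => d) PySem.Dict.empty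
  ngram_count.items

-- ===== PRECONDITION & SPEC =====
def Spec_ngraph_counterizer (ngraph : List (String × Int)) (terms : List String) (out : List (Int × Int)) : Prop := out = ngraph_counterizer_alt ngraph terms
instance (ngraph : List (String × Int)) (terms : List String) (out : List (Int × Int)) : Decidable (Spec_ngraph_counterizer ngraph terms out) := by unfold Spec_ngraph_counterizer; infer_instance

-- ===== CLAIM (what is proved, stated in full; the proofs are below) =====
def Claim_equal_ngraph_counterizer : Prop := ∀ (ngraph : List (String × Int)) (terms : List String), Dom_ngraph_counterizer ngraph terms → Spec_ngraph_counterizer ngraph terms (ngraph_counterizer ngraph terms)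

-- ===== LEMMAS AND PROOFS =====

-- A's per-occurrence step and B's per-distinct-ngram step (definitionally the loop bodies of the ports)
def aStep (ngraph : List (String × Int)) (d : PySem.Dict Int Int) (g : List Char) : PySem.Dict Int Int :=
  match dictGet? ngraph g with
  | some v => d.modify v 0 (· + 1)
  | none => d

def bStep (ngraph : List (String × Int)) (d : PySem.Dict Int Int) (p : List Char × Int) : PySem.Dict Int Int :=
  match dictGet? ngraph p.1 with
  | some v => d.modify v 0 (· + p.2)
  | none => d

lemma aStep_some {ngraph : List (String × Int)} {g : List Char} {v : Int}
    (h : dictGet? ngraph g = some v) (d : PySem.Dict Int Int) :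
    aStep ngraph d g = d.modify v 0 (· + 1) := by unfold aStep; rw [h]

lemma aStep_none {ngraph : List (String × Int)} {g : List Char}
    (h : dictGet? ngraph g = none) (d : PySem.Dict Int Int) :
    aStep ngraph d g = d := by unfold aStep; rw [h]

lemma bStep_some {ngraph : List (String × Int)} {g : List Char} {v : Int}
    (h : dictGet? ngraph g = some v) (d : PySem.Dict Int Int) (f : Int) :
    bStep ngraph d (g, f) = d.modify v 0 (· + f) := by unfold bStep; rw [h]

lemma bStep_none {ngraph : List (String × Int)} {g : List Char}
    (h : dictGet? ngraph g = none) (d : PySem.Dict Int Int) (f : Int) :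
    bStep ngraph d (g, f) = d := by unfold bStep; rw [h]

lemma enum_foldl {α β : Type} (l : List α) (s : Int) (f : β → α → β) (d : β) :
    (PySem.List.enumerate l s).foldl (fun acc p => f acc p.2) d = l.foldl f d := by
  induction l generalizing s d with
  | nil => rfl
  | cons x t ih => simp [PySem.List.enumerate, ih]

lemma A_eq (ngraph : List (String × Int)) (terms : List String) :
    ngraph_counterizer ngraph terms
      = ((terms.flatMap (letterNgrams · 5)).foldl (aStep ngraph) PySem.Dict.empty).items := by
  show ((PySem.List.enumerate terms).foldl
      (fun d p => (letterNgrams p.2 5).foldl (aStep ngraph) d) PySem.Dict.empty).items = _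
  rw [enum_foldl terms 0 (fun d t => (letterNgrams t 5).foldl (aStep ngraph) d), List.foldl_flatMap]

lemma B_eq (ngraph : List (String × Int)) (terms : List String) :
    ngraph_counterizer_alt ngraph terms
      = ((PySem.Dict.counter (terms.flatMap (letterNgrams · 5))).items.foldl
          (bStep ngraph) PySem.Dict.empty).items := by
  show (((terms.foldl (fun c t => (letterNgrams t 5).foldl
        (fun c g => c.modify g 0 (· + 1)) c) PySem.Dict.empty)).items.foldl
        (bStep ngraph) PySem.Dict.empty).items = _
  rw [PySem.Dict.counter_eq_foldl, List.foldl_flatMap]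

-- two Counter increments at the same key fuse
lemma modify_combine (d : PySem.Dict Int Int) (k a b : Int) :
    (d.modify k 0 (· + a)).modify k 0 (· + b) = d.modify k 0 (· + (a + b)) := by
  simp [PySem.Dict.modify, PySem.Dict.getD_insert_self, PySem.Dict.insert_insert_self, add_assoc]

lemma contains_modify_self {κ ν : Type} [BEq κ] [LawfulBEq κ] (d : PySem.Dict κ ν)
    (k : κ) (d0 : ν) (f : ν → ν) : (d.modify k d0 f).contains k = true := by
  simp [PySem.Dict.modify]

-- inserting at an ALREADY PRESENT key commutes with any other insert (in-place update)
lemma insert_comm_of_contains {κ ν : Type} [BEq κ] [LawfulBEq κ] (d : PySem.Dict κ ν)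
    {k k' : κ} (v v' : ν) (hk : d.contains k = true) (hne : k' ≠ k) :
    (d.insert k v).insert k' v' = (d.insert k' v').insert k v := by
  apply PySem.Dict.ext
  by_cases hk' : d.contains k' = true
  · rw [PySem.Dict.items_insert_of_contains _ v' (by rw [PySem.Dict.contains_insert]; simp [hk']),
      PySem.Dict.items_insert_of_contains _ v hk,
      PySem.Dict.items_insert_of_contains _ v (by rw [PySem.Dict.contains_insert]; simp [hk]),
      PySem.Dict.items_insert_of_contains _ v' hk']
    simp only [List.map_map]
    apply List.map_congr_left
    intro p _
    by_cases h1 : p.1 = k <;> by_cases h2 : p.1 = k' <;>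
      simp_all [Function.comp, beq_iff_eq]
  · rw [PySem.Dict.items_insert_of_not_contains _ v'
        (by rw [PySem.Dict.contains_insert]; simp [hk', hne]),
      PySem.Dict.items_insert_of_contains _ v hk,
      PySem.Dict.items_insert_of_contains _ v (by rw [PySem.Dict.contains_insert]; simp [hk]),
      PySem.Dict.items_insert_of_not_contains _ v' (by simpa using hk'),
      List.map_append]
    simp [beq_iff_eq, hne]

lemma contains_modify_of_contains {κ ν : Type} [BEq κ] [LawfulBEq κ] (d : PySem.Dict κ ν)
    (id k : κ) (d0 : ν) (f : ν → ν) (h : d.contains id = true) :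
    (d.modify k d0 f).contains id = true := by
  simp [PySem.Dict.modify, PySem.Dict.contains_insert, h]

lemma bStep_contains (ngraph : List (String × Int)) (d : PySem.Dict Int Int)
    (p : List Char × Int) (id : Int) (h : d.contains id = true) :
    (bStep ngraph d p).contains id = true := by
  unfold bStep
  cases dictGet? ngraph p.1 with
  | none => exact h
  | some v => exact contains_modify_of_contains d id v 0 _ h

-- A's final +1 at a key already present in d commutes past any bStep
lemma aStep_bStep_swap (ngraph : List (String × Int)) {g : List Char} {id : Int}
    (h : dictGet? ngraph g = some id) (d : PySem.Dict Int Int) (p : List Char × Int)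
    (hc : d.contains id = true) :
    aStep ngraph (bStep ngraph d p) g = bStep ngraph (aStep ngraph d g) p := by
  obtain ⟨q, f⟩ := p
  cases hp : dictGet? ngraph q with
  | none => rw [bStep_none hp, bStep_none hp]
  | some v =>
    rw [bStep_some hp, bStep_some hp, aStep_some h, aStep_some h]
    by_cases hv : v = id
    · subst hv
      rw [modify_combine, modify_combine, add_comm]
    · simp only [PySem.Dict.modify]
      rw [PySem.Dict.getD_insert_of_ne _ _ _ hv, PySem.Dict.getD_insert_of_ne _ _ _ (Ne.symm hv)]
      exact (insert_comm_of_contains d _ _ hc hv).symm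

lemma push (ngraph : List (String × Int)) {g : List Char} {id : Int}
    (h : dictGet? ngraph g = some id) :
    ∀ (ps : List (List Char × Int)) (d : PySem.Dict Int Int), d.contains id = true →
      aStep ngraph (ps.foldl (bStep ngraph) d) g = ps.foldl (bStep ngraph) (aStep ngraph d g) := by
  intro ps
  induction ps with
  | nil => intro d _; rfl
  | cons p t ih =>
    intro d hc
    simp only [List.foldl_cons]
    rw [ih (bStep ngraph d p) (bStep_contains ngraph d p id hc), aStep_bStep_swap ngraph h d p hc]

lemma bStep_one (ngraph : List (String × Int)) (d : PySem.Dict Int Int) (g : List Char) :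
    bStep ngraph d (g, 1) = aStep ngraph d g := by
  unfold bStep aStep
  cases dictGet? ngraph g <;> rfl

-- bumping the count of ONE distinct n-gram g by 1 inside the translation pass
-- equals doing A's per-occurrence step once at the end
lemma bump (ngraph : List (String × Int)) (g : List Char) :
    ∀ (ks : List (List Char)), ks.Nodup → g ∈ ks → ∀ (cnt : List Char → Int) (d : PySem.Dict Int Int),
      (ks.map (fun k => if k = g then (k, cnt k + 1) else (k, cnt k))).foldl (bStep ngraph) d
        = aStep ngraph ((ks.map (fun k => (k, cnt k))).foldl (bStep ngraph) d) g := by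
  intro ks
  induction ks with
  | nil => intro _ hg; exact absurd hg (List.not_mem_nil)
  | cons k t ih =>
    intro hnd hg cnt d
    have hkt : k ∉ t := (List.nodup_cons.mp hnd).1
    have hndt : t.Nodup := (List.nodup_cons.mp hnd).2
    by_cases hk : k = g
    · subst hk
      have hmaps : t.map (fun j => if j = k then (j, cnt j + 1) else (j, cnt j))
          = t.map (fun j => (j, cnt j)) := by
        apply List.map_congr_left
        intro j hj
        have : j ≠ k := fun e => hkt (e ▸ hj)
        simp [this]
      simp only [List.map_cons, List.foldl_cons, if_true, hmaps]
      cases hner : dictGet? ngraph k with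
      | none =>
        rw [bStep_none hner, bStep_none hner, aStep_none hner]
      | some id =>
        rw [bStep_some hner, bStep_some hner]
        have hc : (d.modify id 0 (· + cnt k)).contains id = true :=
          contains_modify_self d id 0 _
        rw [push ngraph hner _ _ hc, aStep_some hner, modify_combine]
    · have hgt : g ∈ t := by
        cases hg with
        | head => exact absurd rfl hk
        | tail _ h => exact h
      simp only [List.map_cons, List.foldl_cons, if_neg hk]
      exact ih hndt hgt cnt (bStep ngraph d (k, cnt k))

lemma counter_fold_eq (ngraph : List (String × Int)) (grams : List (List Char)) :
    ((PySem.Set.ofList grams).map (fun k => (k, (List.count k grams : Int)))).foldl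
        (bStep ngraph) PySem.Dict.empty
      = grams.foldl (aStep ngraph) PySem.Dict.empty := by
  induction grams using List.reverseRecOn with
  | nil => rfl
  | append_singleton gs g IH =>
    rw [List.foldl_append]
    simp only [List.foldl_cons, List.foldl_nil]
    have hof : PySem.Set.ofList (gs ++ [g]) = PySem.Set.add (PySem.Set.ofList gs) g := by
      rw [PySem.Set.ofList_eq_foldl, PySem.Set.ofList_eq_foldl, List.foldl_append]; rfl
    by_cases hg : g ∈ gs
    · have hadd : PySem.Set.add (PySem.Set.ofList gs) g = PySem.Set.ofList gs := by
        simp [PySem.Set.add, PySem.Set.contains, PySem.Set.mem_ofList, hg]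
      have hmap : (PySem.Set.ofList gs).map (fun k => (k, (List.count k (gs ++ [g]) : Int)))
          = (PySem.Set.ofList gs).map
              (fun k => if k = g then (k, (List.count k gs : Int) + 1) else (k, (List.count k gs : Int))) := by
        apply List.map_congr_left
        intro k _
        by_cases hk : k = g
        · subst hk; simp [List.count_append]
        · simp [List.count_append, Ne.symm hk, hk]
      rw [hof, hadd, hmap,
        bump ngraph g (PySem.Set.ofList gs) (PySem.Set.nodup_ofList gs)
          ((PySem.Set.mem_ofList gs g).mpr hg), IH]
    · have hadd : PySem.Set.add (PySem.Set.ofList gs) g = PySem.Set.ofList gs ++ [g] := by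
        simp [PySem.Set.add, PySem.Set.contains, PySem.Set.mem_ofList, hg]
      have hcount : (List.count g (gs ++ [g]) : Int) = 1 := by
        rw [List.count_append]
        simp [List.count_eq_zero.mpr hg]
      have hmap : (PySem.Set.ofList gs).map (fun k => (k, (List.count k (gs ++ [g]) : Int)))
          = (PySem.Set.ofList gs).map (fun k => (k, (List.count k gs : Int))) := by
        apply List.map_congr_left
        intro k hkmem
        have hk : k ≠ g := fun e => hg (e ▸ (PySem.Set.mem_ofList gs k).mp hkmem)
        simp [List.count_append, Ne.symm hk]
      rw [hof, hadd, List.map_append, List.map_singleton, hcount, List.foldl_append, hmap, IH]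
      simp only [List.foldl_cons, List.foldl_nil]
      exact bStep_one ngraph _ g

-- ===== VERDICT (by name: the statement is the Claim_ definition above) =====
theorem ngraph_counterizer_spec : Claim_equal_ngraph_counterizer := by
  intro ngraph terms _
  show ngraph_counterizer ngraph terms = ngraph_counterizer_alt ngraph terms
  rw [A_eq, B_eq, PySem.Dict.items_counter, counter_fold_eq]
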